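-- pv_equiv track=rewrite | github.com/brianwuuu/SiPAC | network_topology/bcube_network_topology.py | connectSameIndexNodes
-- ===== SOURCE A (Python) =====
-- def connectSameIndexNodes(group_list):
--     # group_list is a list of lists with same length
--     # this function connects the nodes of the same index in each of the lists in a full mesh
--     num_gpus_per_group = len(group_list[0])
--     res = []
--     for gpu_id in range(num_gpus_per_group):
--         group = []
--         for src_group_id in range(len(group_list)):
--             src_gpu = group_list[src_group_id][gpu_id]
--             group.append(src_gpu)
--             for dst_group_id in range(src_group_id+1, len(group_list)):
--                 dst_gpu = group_list[dst_group_id][gpu_id]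
--                 assert(src_group_id != dst_group_id and src_gpu != dst_gpu)
--                 group.append(dst_gpu)
--         res.append(group)
--     return res
-- ===== SOURCE B (Python) =====
-- def connectSameIndexNodes(group_list):
--     width = min((len(row) for row in group_list), default=0)
--     return [_suffix_chain([row[j] for row in group_list]) for j in range(width)]
--
-- def _suffix_chain(col):
--     # full-mesh link order for one column = the column followed by its proper suffixes
--     return col + _suffix_chain(col[1:]) if col else []
-- ===== Notes on version B (the rewrite author's own statement) =====
-- stated objective: simpler
-- what changed: B replaces A's triple nested index loop (per-source append plus an inner destination scan) by extracting each column once and emitting it as a recursive suffix chain (col + chain(col[1:])), dropping the index bookkeeping and the assert.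
import Mathlib
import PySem

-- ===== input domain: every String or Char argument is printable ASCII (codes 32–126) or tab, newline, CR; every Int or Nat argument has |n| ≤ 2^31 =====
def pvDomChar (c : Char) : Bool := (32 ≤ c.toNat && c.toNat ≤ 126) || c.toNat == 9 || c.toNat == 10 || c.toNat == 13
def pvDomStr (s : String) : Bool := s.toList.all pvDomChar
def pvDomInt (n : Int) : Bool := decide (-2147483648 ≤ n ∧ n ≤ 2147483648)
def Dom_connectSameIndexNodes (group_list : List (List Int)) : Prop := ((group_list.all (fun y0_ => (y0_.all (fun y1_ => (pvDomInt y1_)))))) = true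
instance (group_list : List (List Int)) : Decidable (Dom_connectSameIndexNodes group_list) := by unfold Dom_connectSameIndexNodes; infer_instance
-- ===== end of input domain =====

-- B builds each mesh group as a recursive suffix chain of the extracted column instead of A's
-- triple nested index loop; objective: simpler (same asymptotic cost).

-- ===== PORT A =====
def connectSameIndexNodes (group_list : List (List Int)) : List (List Int) :=
  let num_gpus_per_group : Int := ((PySem.List.pyGetD group_list 0 []).length : Int)
  (PySem.List.pyRange 0 num_gpus_per_group 1).foldl (fun res gpu_id =>
    let group :=
      (PySem.List.pyRange 0 (group_list.length : Int) 1).foldl (fun group src_group_id =>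
        let src_gpu := PySem.List.pyGetD (PySem.List.pyGetD group_list src_group_id []) gpu_id 0
        let group := group ++ [src_gpu]
        (PySem.List.pyRange (src_group_id + 1) (group_list.length : Int) 1).foldl (fun group dst_group_id =>
          let dst_gpu := PySem.List.pyGetD (PySem.List.pyGetD group_list dst_group_id []) gpu_id 0
          -- A's 'assert src_group_id != dst_group_id and src_gpu != dst_gpu' raises exactly on
          -- the inputs Pre_ excludes, so the port carries no assert
          group ++ [dst_gpu]) group) []
    res ++ [group]) []

-- ===== PORT B =====
def suffixChain : List Int → List Int
  | [] => []
  | x :: xs => (x :: xs) ++ suffixChain xs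

def connectSameIndexNodes_alt (group_list : List (List Int)) : List (List Int) :=
  let width := PySem.List.minD (group_list.map List.length) (fun x => x) 0
  (List.range width).map (fun j =>
    suffixChain (group_list.map (fun row => row.getD j 0)))

-- ===== PRECONDITION & SPEC =====
-- Pre_ = exactly the inputs where the Python A returns: a non-empty list whose rows all reach the
-- first row's length (else IndexError) and whose columns, over that width, have no duplicate
-- value (else AssertionError).
def Pre_connectSameIndexNodes (group_list : List (List Int)) : Prop :=
  group_list ≠ [] ∧
  (∀ r ∈ group_list, (group_list.headD []).length ≤ r.length) ∧
  (∀ j ∈ List.range (group_list.headD []).length,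
    (group_list.map (fun r => r.getD j 0)).Nodup)
instance (group_list : List (List Int)) : Decidable (Pre_connectSameIndexNodes group_list) := by
  unfold Pre_connectSameIndexNodes; infer_instance
def pvWitness_connectSameIndexNodes : List (List Int) := [[1, 5], [2, 6], [3, 7]]

def Spec_connectSameIndexNodes (group_list : List (List Int)) (out : List (List Int)) : Prop :=
  out = connectSameIndexNodes_alt group_list
instance (group_list : List (List Int)) (out : List (List Int)) : Decidable (Spec_connectSameIndexNodes group_list out) := by
  unfold Spec_connectSameIndexNodes; infer_instance

-- ===== CLAIM (what is proved, stated in full; the proofs are below) =====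
def Claim_equal_connectSameIndexNodes : Prop := ∀ (group_list : List (List Int)), Dom_connectSameIndexNodes group_list → Pre_connectSameIndexNodes group_list → Spec_connectSameIndexNodes group_list (connectSameIndexNodes group_list)

-- ===== LEMMAS AND PROOFS =====

theorem suffixChain_eq_flatMap (c : List Int) :
    suffixChain c = (List.range c.length).flatMap (fun k => c.drop k) := by
  induction c with
  | nil => simp [suffixChain]
  | cons x xs ih =>
    simp [suffixChain, List.length_cons, List.range_succ_eq_map, List.flatMap_cons,
      List.flatMap_map, ih]

theorem width_eq (h : List Int) (t : List (List Int))
    (hlen : ∀ r ∈ h :: t, ((h :: t).headD []).length ≤ r.length) :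
    PySem.List.minD ((h :: t).map List.length) (fun x => x) 0 = h.length := by
  have hmin : (t.map List.length).foldl min h.length = h.length := by
    refine le_antisymm (PySem.List.foldl_min_le (t.map List.length) h.length).1 ?_
    rcases PySem.List.foldl_min_mem (t.map List.length) h.length with he | hm
    · exact he.ge
    · obtain ⟨r, hr, hrl⟩ := List.mem_map.mp hm
      exact hrl ▸ hlen r (List.mem_cons_of_mem h hr)
  have h1 : PySem.List.min? ((h :: t).map List.length) (fun y => y)
      = some ((t.map List.length).foldl min h.length) :=
    PySem.List.min?_id_cons h.length (t.map List.length)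
  rw [List.map_cons] at h1
  simp [PySem.List.minD, h1, hmin]

theorem group_eq (gl : List (List Int)) (j : Nat) :
    (PySem.List.pyRange 0 (gl.length : Int) 1).foldl (fun group src_group_id =>
        (PySem.List.pyRange (src_group_id + 1) (gl.length : Int) 1).foldl
          (fun g dst_group_id =>
            g ++ [PySem.List.pyGetD (PySem.List.pyGetD gl dst_group_id []) (j : Int) 0])
          (group ++ [PySem.List.pyGetD (PySem.List.pyGetD gl src_group_id []) (j : Int) 0])) []
      = suffixChain (gl.map (fun row => row.getD j 0)) := by
  have hcol : ∀ d : Int, PySem.List.pyGetD (gl.map (fun row => row.getD j 0)) d 0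
      = PySem.List.pyGetD (PySem.List.pyGetD gl d []) (j : Int) 0 := by
    intro d
    have h0 : ([] : List Int).getD j 0 = 0 := by simp
    have := PySem.List.pyGetD_map (fun row : List Int => row.getD j 0) gl d []
    rw [h0] at this
    rw [this, PySem.List.pyGetD_natCast]
  have hL : PySem.List.len (gl.map (fun row => row.getD j 0)) = (gl.length : Int) := by
    simp [PySem.List.len]
  rw [PySem.List.foldl_congr_mem _ _
      (fun g s => g ++ (gl.map (fun row => row.getD j 0)).drop s.toNat) []]
  · rw [PySem.List.pyRange_zero_natCast, List.foldl_map]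
    refine (PySem.List.foldl_congr_mem _ _
        (fun g k => g ++ (gl.map (fun row => row.getD j 0)).drop k) [] ?_).trans ?_
    · intro acc k _
      simp
    · rw [PySem.List.foldl_append_eq_flatMap, suffixChain_eq_flatMap]
      simp
  · intro acc s hs
    rw [PySem.List.mem_pyRange_one] at hs
    obtain ⟨hs0, hs1⟩ := hs
    rw [PySem.List.foldl_append_singleton_eq_map]
    have hmap := PySem.List.map_pyGetD_pyRange (gl.map (fun row => row.getD j 0)) (0 : Int)
      (a := s + 1) (by omega)
    rw [hL] at hmap
    simp only [← hcol]
    rw [hmap]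
    have hlt : s < ((gl.map (fun row => row.getD j 0)).length : Int) := by
      simpa using hs1
    rw [PySem.List.pyGetD_eq_getElem _ _ hs0 hlt]
    have h1 : (s + 1).toNat = s.toNat + 1 := by omega
    rw [h1, List.append_assoc, List.singleton_append,
      ← List.drop_eq_getElem_cons (by omega : s.toNat < (gl.map (fun row => row.getD j 0)).length)]

-- ===== VERDICT (by name: the statement is the Claim_ definition above) =====

theorem connectSameIndexNodes_spec : Claim_equal_connectSameIndexNodes := by
  intro gl hdom hpre
  obtain ⟨hne, hlen, -⟩ := hpre
  unfold Spec_connectSameIndexNodes connectSameIndexNodes connectSameIndexNodes_alt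
  cases gl with
  | nil => exact absurd rfl hne
  | cons h t =>
    simp only [PySem.List.pyGetD_zero_cons]
    rw [width_eq h t hlen]
    rw [PySem.List.foldl_append_singleton_eq_map, PySem.List.pyRange_zero_natCast h.length,
      List.map_map, List.nil_append]
    refine List.map_congr_left ?_
    intro j hj
    exact group_eq (h :: t) j
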